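-- pv_equiv track=rewrite | github.com/elmoallistair/Edabit | Python/Hard/Tallest Skyscraper/code.py | tallest_skyscraper
-- ===== SOURCE A (Python) =====
-- def tallest_skyscraper(lst):
--     temp = []
--     for i in range(len(lst)):
--         for j in range(len(lst[i])):
--             temp.append(0)
--             if lst[i][j] == 1:
--                 temp[j]+=1
--     return max(temp)
-- ===== SOURCE B (Python) =====
-- def tallest_skyscraper(lst):
--     width = max((len(r) for r in lst), default=0)
--     best = 0
--     for j in range(width):
--         count = 0
--         for r in lst:
--             if len(r) > j and r[j] == 1:
--                 count += 1
--         best = max(best, count)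
--     return best
-- ===== Notes on version B (the rewrite author's own statement) =====
-- stated objective: alternative
-- what changed: B scans column-major, counting the 1s of each column index directly and keeping a running best, instead of A's row-major pass that appends a zero per cell and bumps a bucket list then takes max of that (cells-long) list.
-- outside the precondition, e.g. on tallest_skyscraper([]): A raises ValueError, B returns 0
import Mathlib
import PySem

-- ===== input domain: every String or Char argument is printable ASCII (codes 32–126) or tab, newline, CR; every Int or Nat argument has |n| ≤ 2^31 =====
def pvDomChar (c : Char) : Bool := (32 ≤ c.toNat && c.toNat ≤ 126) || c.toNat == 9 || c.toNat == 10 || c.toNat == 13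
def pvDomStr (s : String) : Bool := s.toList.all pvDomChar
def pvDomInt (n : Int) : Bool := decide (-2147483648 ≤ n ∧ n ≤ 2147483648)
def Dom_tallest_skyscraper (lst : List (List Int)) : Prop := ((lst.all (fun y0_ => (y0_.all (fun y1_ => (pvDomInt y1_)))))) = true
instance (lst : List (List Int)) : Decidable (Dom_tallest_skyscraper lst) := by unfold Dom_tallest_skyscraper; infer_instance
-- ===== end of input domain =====

-- B replaces A's row-major bucket-list pass by a column-major counting scan with a running best (alternative decomposition, same cost); A raises ValueError when there are no cells (excluded by Pre_), where B returns 0.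

-- ===== PORT A =====
-- one inner-loop body of A: temp.append(0); if lst[i][j] == 1: temp[j] += 1
def tsStep (row : List Int) (t : List Int) (j : Nat) : List Int :=
  let t' := t ++ [0]
  if row.getD j 0 = 1 then t'.set j (t'.getD j 0 + 1) else t'

-- A's inner loop 'for j in range(len(lst[i]))'
def tsRow (t : List Int) (row : List Int) : List Int :=
  (List.range row.length).foldl (tsStep row) t

def tallest_skyscraper (lst : List (List Int)) : Int :=
  let temp := (List.range lst.length).foldl (fun t i => tsRow t (lst.getD i [])) []
  (PySem.List.max? temp (fun y => y)).getD 0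

-- ===== PORT B =====
-- B's inner loop: count of rows r with len(r) > j and r[j] == 1
def colCount (lst : List (List Int)) (j : Nat) : Int :=
  lst.foldl (fun c r => if j < r.length ∧ r.getD j 0 = 1 then c + 1 else c) 0

def tallest_skyscraper_alt (lst : List (List Int)) : Int :=
  let width := lst.foldl (fun w r => max w r.length) 0
  (List.range width).foldl (fun best j => max best (colCount lst j)) 0

-- ===== PRECONDITION & SPEC =====
-- Pre_ excludes inputs with no cells at all (empty list or all rows empty): there A's max([]) raises ValueError.
def Pre_tallest_skyscraper (lst : List (List Int)) : Prop := ∃ r ∈ lst, r ≠ []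
instance (lst : List (List Int)) : Decidable (Pre_tallest_skyscraper lst) := by unfold Pre_tallest_skyscraper; infer_instance
def pvWitness_tallest_skyscraper : List (List Int) := [[1, 0], [1, 1]]

def Spec_tallest_skyscraper (lst : List (List Int)) (out : Int) : Prop := out = tallest_skyscraper_alt lst
instance (lst : List (List Int)) (out : Int) : Decidable (Spec_tallest_skyscraper lst out) := by unfold Spec_tallest_skyscraper; infer_instance

-- ===== CLAIM (what is proved, stated in full; the proofs are below) =====
def Claim_equal_tallest_skyscraper : Prop := ∀ (lst : List (List Int)), Dom_tallest_skyscraper lst → Pre_tallest_skyscraper lst → Spec_tallest_skyscraper lst (tallest_skyscraper lst)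

-- ===== LEMMAS AND PROOFS =====

lemma getD_append_zero (t : List Int) (m : Nat) : (t ++ [0]).getD m 0 = t.getD m 0 := by
  simp only [List.getD_eq_getElem?_getD, List.getElem?_append]
  split
  · rfl
  · rename_i h
    rcases Nat.lt_or_ge (m - t.length) 1 with h1 | h1
    · interval_cases hm : (m - t.length) <;> simp [List.getElem?_eq_none (by omega : t.length ≤ m)]
    · simp [List.getElem?_eq_none (by omega : t.length ≤ m), List.getElem?_eq_none (by simp; omega : ([0]:List Int).length ≤ m - t.length)]

lemma getD_set_lt (t : List Int) (j : Nat) (v : Int) (m : Nat) (hj : j < t.length) :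
    (t.set j v).getD m 0 = if m = j then v else t.getD m 0 := by
  simp only [List.getD_eq_getElem?_getD, List.getElem?_set]
  split
  · rename_i h; subst h; simp [hj]
  · rename_i h; rw [if_neg (fun hmj => h hmj.symm)]

lemma tsRowN (row t : List Int) (n : Nat) :
    ((List.range n).foldl (tsStep row) t).length = t.length + n ∧
    ∀ m, ((List.range n).foldl (tsStep row) t).getD m 0 =
      t.getD m 0 + (if m < n ∧ row.getD m 0 = 1 then 1 else 0) := by
  induction n with
  | zero => simp
  | succ n ih =>
    obtain ⟨ihl, ihg⟩ := ih
    rw [List.range_succ, List.foldl_append, List.foldl_cons, List.foldl_nil]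
    set G := (List.range n).foldl (tsStep row) t with hG
    unfold tsStep
    simp only []
    split
    · rename_i hrow
      refine ⟨by simp only [List.length_set, List.length_append, List.length_cons, List.length_nil, ihl]; omega, ?_⟩
      intro m
      rw [getD_set_lt _ _ _ _ (by simp only [List.length_append, List.length_cons, List.length_nil, ihl]; omega)]
      by_cases hm : m = n
      · subst hm
        rw [if_pos rfl, getD_append_zero, ihg,
          if_neg (fun h => Nat.lt_irrefl _ h.1), if_pos ⟨Nat.lt_succ_self _, hrow⟩]
        ring
      · rw [if_neg hm, getD_append_zero, ihg]
        congr 1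
        refine if_congr ⟨fun ⟨h1, h2⟩ => ⟨by omega, h2⟩, fun ⟨h1, h2⟩ => ⟨?_, h2⟩⟩ rfl rfl
        rcases Nat.lt_or_ge m n with h3 | h3
        · exact h3
        · exact absurd (by omega : m = n) hm
    · rename_i hrow
      refine ⟨by simp only [List.length_set, List.length_append, List.length_cons, List.length_nil, ihl]; omega, ?_⟩
      intro m
      rw [getD_append_zero, ihg]
      congr 1
      refine if_congr ⟨fun ⟨h1, h2⟩ => ⟨by omega, h2⟩, fun ⟨h1, h2⟩ => ⟨?_, h2⟩⟩ rfl rfl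
      rcases Nat.lt_or_ge m n with h3 | h3
      · exact h3
      · have : m = n := by omega
        subst this; exact absurd h2 hrow

lemma foldl_range_getD (l : List (List Int)) (t : List Int) :
    (List.range l.length).foldl (fun t i => tsRow t (l.getD i [])) t = l.foldl tsRow t := by
  induction l generalizing t with
  | nil => simp
  | cons a l ih =>
    rw [List.length_cons, List.range_succ_eq_map, List.foldl_cons, List.foldl_map,
      List.foldl_cons]
    simp only [List.getD_cons_zero, List.getD_cons_succ]
    exact ih (tsRow t a)

lemma colCount_shift (lst : List (List Int)) (j : Nat) (c : Int) :
    lst.foldl (fun c r => if j < r.length ∧ r.getD j 0 = 1 then c + 1 else c) c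
      = c + colCount lst j := by
  induction lst generalizing c with
  | nil => simp [colCount]
  | cons a l ih =>
    rw [List.foldl_cons]
    show _ = c + colCount (a :: l) j
    rw [colCount, List.foldl_cons]
    split
    · rw [ih, ih]; ring
    · rw [ih, ih]; ring

lemma temp_char (lst : List (List Int)) (t : List Int) :
    (lst.foldl tsRow t).length = t.length + (lst.map List.length).sum ∧
    ∀ m, (lst.foldl tsRow t).getD m 0 = t.getD m 0 + colCount lst m := by
  induction lst generalizing t with
  | nil => simp [colCount]
  | cons a l ih =>
    rw [List.foldl_cons]
    obtain ⟨ihl, ihg⟩ := ih (tsRow t a)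
    constructor
    · rw [ihl, tsRow, (tsRowN a t a.length).1, List.map_cons, List.sum_cons]; omega
    · intro m
      have hc : colCount (a :: l) m
          = (if m < a.length ∧ a.getD m 0 = 1 then (0:Int) + 1 else 0) + colCount l m := by
        rw [colCount, List.foldl_cons, colCount_shift]
      rw [ihg, tsRow, (tsRowN a t a.length).2, hc]
      split
      · ring
      · ring

lemma colCount_nonneg (lst : List (List Int)) (j : Nat) : 0 ≤ colCount lst j := by
  induction lst with
  | nil => simp [colCount]
  | cons a l ih =>
    rw [colCount, List.foldl_cons, colCount_shift]
    split <;> omega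

lemma colCount_zero (lst : List (List Int)) (j : Nat)
    (h : ∀ r ∈ lst, r.length ≤ j) : colCount lst j = 0 := by
  induction lst with
  | nil => rfl
  | cons a l ih =>
    rw [colCount, List.foldl_cons, if_neg (fun hc => by have := h a (by simp); omega),
      colCount_shift, ih (fun r hr => h r (by simp [hr]))]
    ring

lemma width_le_sum (lst : List (List Int)) (a : Nat) :
    lst.foldl (fun w r => max w r.length) a ≤ a + (lst.map List.length).sum := by
  induction lst generalizing a with
  | nil => simp
  | cons b l ih =>
    rw [List.foldl_cons, List.map_cons, List.sum_cons]
    calc l.foldl (fun w r => max w r.length) (max a b.length)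
        ≤ max a b.length + (l.map List.length).sum := ih _
      _ ≤ a + (b.length + (l.map List.length).sum) := by omega

lemma foldl_max_zero (l : List Nat) (f : Nat → Int) (hf : ∀ k ∈ l, f k = 0) (b : Int)
    (hb : 0 ≤ b) : l.foldl (fun b k => max b (f k)) b = b := by
  induction l generalizing b with
  | nil => rfl
  | cons a l ih =>
    rw [List.foldl_cons, hf a (by simp), max_eq_left hb]
    exact ih (fun k hk => hf k (by simp [hk])) b hb

theorem ts_eq (lst : List (List Int)) (hp : ∃ r ∈ lst, r ≠ []) :
    tallest_skyscraper lst = tallest_skyscraper_alt lst := by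
  rw [tallest_skyscraper, tallest_skyscraper_alt]
  rw [foldl_range_getD]
  set temp := lst.foldl tsRow ([] : List Int) with htempdef
  set W := lst.foldl (fun w r => max w r.length) 0 with hWdef
  obtain ⟨hlen, hget⟩ := temp_char lst []
  rw [List.length_nil, Nat.zero_add] at hlen
  have hget' : ∀ m, temp.getD m 0 = colCount lst m := by
    intro m; rw [← htempdef] at hget; rw [hget m]; simp
  have hWle : ∀ r ∈ lst, r.length ≤ W := by
    intro r hr
    exact (PySem.List.le_foldl_max_nat lst List.length 0).2 r hr
  have hWL : W ≤ temp.length := by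
    rw [hlen]; simpa using width_le_sum lst 0
  have hpos : 0 < temp.length := by
    obtain ⟨r, hr, hrne⟩ := hp
    have h1 : r.length ≤ (lst.map List.length).sum :=
      List.single_le_sum (fun x _ => Nat.zero_le x) _ (List.mem_map_of_mem hr)
    have h2 : 0 < r.length := List.length_pos_of_ne_nil hrne
    rw [hlen]; omega
  have hnonneg : ∀ x ∈ temp, (0:Int) ≤ x := by
    intro x hx
    obtain ⟨m, hm, hxm⟩ := List.mem_iff_getElem.1 hx
    have := hget' m
    rw [List.getD_eq_getElem _ _ hm, hxm] at this
    rw [this]; exact colCount_nonneg lst m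
  -- temp as a map of column counts
  have htempmap : temp = (List.range temp.length).map (colCount lst) := by
    apply List.ext_getElem (by simp)
    intro i hi _
    rw [List.getElem_map, List.getElem_range, ← List.getD_eq_getElem _ 0 hi, hget' i]
  -- evaluate A's max
  cases htmp : temp with
  | nil => rw [htmp] at hpos; simp at hpos
  | cons h tl =>
    rw [PySem.List.max?_id_cons, Option.getD_some]
    have h0 : (0:Int) ≤ h := hnonneg h (by rw [htmp]; simp)
    have hfold : tl.foldl max h = temp.foldl max 0 := by
      rw [htmp, List.foldl_cons, max_eq_right h0]
    rw [hfold, htempmap, List.foldl_map]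
    have hsplit : List.range temp.length
        = List.range W ++ (List.range (temp.length - W)).map (W + ·) := by
      rw [← List.range_add, Nat.add_sub_cancel' hWL]
    rw [hsplit, List.foldl_append, List.foldl_map]
    apply foldl_max_zero
    · intro k _
      exact colCount_zero lst (W + k) (fun r hr => le_trans (hWle r hr) (Nat.le_add_right _ _))
    · exact (PySem.List.le_foldl_max_int (List.range W) (colCount lst) 0).1

-- ===== VERDICT (by name: the statement is the Claim_ definition above) =====
theorem tallest_skyscraper_spec : Claim_equal_tallest_skyscraper :=
  fun lst _ hp => ts_eq lst hp
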